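-- pv_equiv track=rewrite | github.com/IGNF/espace-collaboratif-qgis-plugin | core/XMLResponse.py | convertEncodedCharacters
-- ===== SOURCE A (Python) =====
-- def convertEncodedCharacters(substring):
--     # Equivalences entre les caractères spéciaux de l'API et les chaines Python
--     charConversion = {
--         "\\u00e0": 'à',
--         "\\u00e2": 'â',
--         "\\u00e4": 'ä',
--         "\\u00e7": 'ç',
--         "\\u00e8": 'è',
--         "\\u00e9": 'é',
--         "\\u00ea": 'ê',
--         "\\u00eb": 'ë',
--         "\\u00ee": 'î',
--         "\\u00ef": 'ï',
--         "\\u00f4": 'ô',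
--         "\\u00f6": 'ö',
--         "\\u00f9": 'ù',
--         "\\u00fb": 'û',
--         "\\u00fc": 'ü',
--     }
--
--     newString = substring
--     for c, v in charConversion.items():
--         newString = newString.replace(c, v)
--     return newString
-- ===== SOURCE B (Python) =====
-- def convertEncodedCharacters(substring):
--     # accented characters keyed by the final two hex digits of their escape token
--     accents = {
--         "e0": "à", "e2": "â", "e4": "ä", "e7": "ç", "e8": "è",
--         "e9": "é", "ea": "ê", "eb": "ë", "ee": "î", "ef": "ï",
--         "f4": "ô", "f6": "ö", "f9": "ù", "fb": "û", "fc": "ü",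
--     }
--     table = {"\\u00" + suffix: ch for suffix, ch in accents.items()}
--     out = []
--     i = 0
--     n = len(substring)
--     while i < n:
--         token = substring[i:i + 6]
--         if token in table:
--             out.append(table[token])
--             i += 6
--         else:
--             out.append(substring[i])
--             i += 1
--     return "".join(out)
-- ===== Notes on version B (the rewrite author's own statement) =====
-- stated objective: alternative
-- what changed: A makes fifteen sequential whole-string .replace passes, one per escape sequence; B scans the string once left-to-right, looking each 6-character window up in the token table and jumping past a matched token.
import Mathlib
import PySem

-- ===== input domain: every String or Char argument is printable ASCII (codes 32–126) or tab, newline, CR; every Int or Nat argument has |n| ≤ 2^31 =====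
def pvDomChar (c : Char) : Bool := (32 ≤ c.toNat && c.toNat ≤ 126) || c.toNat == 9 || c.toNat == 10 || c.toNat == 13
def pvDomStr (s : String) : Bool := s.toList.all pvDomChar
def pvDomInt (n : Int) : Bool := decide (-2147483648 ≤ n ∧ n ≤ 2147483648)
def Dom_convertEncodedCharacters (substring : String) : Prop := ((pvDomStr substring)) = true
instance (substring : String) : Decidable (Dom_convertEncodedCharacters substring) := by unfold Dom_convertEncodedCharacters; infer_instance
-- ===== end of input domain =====

set_option maxRecDepth 4000

-- B replaces A's fifteen sequential whole-string .replace passes by one single left-to-right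
-- scan with a token-table lookup (objective: alternative single-pass algorithm, same values).

-- ===== PORT A =====
-- A's dict of escape-sequence → accented-character pairs, in insertion order
def charConversion : List (String × String) :=
  [("\\u00e0", "à"), ("\\u00e2", "â"), ("\\u00e4", "ä"), ("\\u00e7", "ç"),
   ("\\u00e8", "è"), ("\\u00e9", "é"), ("\\u00ea", "ê"), ("\\u00eb", "ë"),
   ("\\u00ee", "î"), ("\\u00ef", "ï"), ("\\u00f4", "ô"), ("\\u00f6", "ö"),
   ("\\u00f9", "ù"), ("\\u00fb", "û"), ("\\u00fc", "ü")]

def convertEncodedCharacters (substring : String) : String :=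
  List.foldl (fun newString cv => PySem.Str.replace newString cv.1 cv.2) substring charConversion

-- ===== PORT B =====
-- B's accented characters, keyed by the final two hex digits of their escape token
def accents : List (List Char × Char) :=
  [(['e','0'], 'à'), (['e','2'], 'â'), (['e','4'], 'ä'), (['e','7'], 'ç'), (['e','8'], 'è'),
   (['e','9'], 'é'), (['e','a'], 'ê'), (['e','b'], 'ë'), (['e','e'], 'î'), (['e','f'], 'ï'),
   (['f','4'], 'ô'), (['f','6'], 'ö'), (['f','9'], 'ù'), (['f','b'], 'û'), (['f','c'], 'ü')]

-- the comprehension {"\\u00" + suffix: ch ...}: full 6-character token → accented character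
def convTable : List (List Char × Char) :=
  accents.map (fun p => ('\\' :: 'u' :: '0' :: '0' :: p.1, p.2))

-- "token in charConversion / charConversion[token]": first-match association-list lookup
def lookupToken (key : List Char) : Option Char :=
  (convTable.find? (fun pv => pv.1 == key)).map (fun pv => pv.2)

-- Source B's while loop: look at the 6-character window at the cursor; on a hit emit the
-- accented character and jump 6, otherwise emit the current character and advance 1
def scanConvert : List Char → List Char
  | [] => []
  | c :: t =>
    match lookupToken (List.take 6 (c :: t)) with
    | some v => v :: scanConvert (List.drop 5 t)
    | none => c :: scanConvert t
termination_by s => s.length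
decreasing_by all_goals (simp; try omega)

def convertEncodedCharacters_alt (substring : String) : String :=
  String.ofList (scanConvert substring.toList)

-- ===== PRECONDITION & SPEC =====
def Spec_convertEncodedCharacters (substring : String) (out : String) : Prop := out = convertEncodedCharacters_alt substring
instance (substring : String) (out : String) : Decidable (Spec_convertEncodedCharacters substring out) := by unfold Spec_convertEncodedCharacters; infer_instance

-- ===== CLAIM (what is proved, stated in full; the proofs are below) =====
def Claim_equal_convertEncodedCharacters : Prop := ∀ (substring : String), Dom_convertEncodedCharacters substring → Spec_convertEncodedCharacters substring (convertEncodedCharacters substring)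

-- ===== LEMMAS AND PROOFS =====

theorem isPrefixOf_false_iff (q l : List Char) : q.isPrefixOf l = false ↔ ¬ q <+: l := by
  rw [Bool.eq_false_iff]
  simp [List.isPrefixOf_iff_prefix]

theorem notPrefix_of_head_ne (a b : Char) (q l : List Char) (h : a ≠ b) :
    (a :: q).isPrefixOf (b :: l) = false := by
  rw [Bool.eq_false_iff]
  intro hT
  exact h ((List.cons_prefix_cons.mp (List.isPrefixOf_iff_prefix.mp hT)).1)

-- Clean structural characterisation of Python's str.replace (for a nonempty pattern)
def repl (old new : List Char) : List Char → List Char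
  | [] => []
  | c :: t =>
    if old.isPrefixOf (c :: t) then new ++ repl old new (List.drop (old.length - 1) t)
    else c :: repl old new t
termination_by s => s.length
decreasing_by all_goals (simp; try omega)

theorem repl_nil (old new : List Char) : repl old new [] = [] := by
  simp [repl]

theorem repl_cons_pos (old new : List Char) (c : Char) (t : List Char)
    (h : old.isPrefixOf (c :: t) = true) :
    repl old new (c :: t) = new ++ repl old new (List.drop (old.length - 1) t) := by
  rw [repl]; simp [h]

theorem repl_cons_neg (old new : List Char) (c : Char) (t : List Char)
    (h : old.isPrefixOf (c :: t) = false) :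
    repl old new (c :: t) = c :: repl old new t := by
  rw [repl]; simp [h]

theorem goSpec (old new : List Char) (hold : old ≠ []) :
    ∀ (fuel : Nat) (l acc : List Char), l.length ≤ fuel →
      PySem.Chars.replace.go old new fuel l acc = acc.reverse ++ repl old new l := by
  intro fuel
  induction fuel with
  | zero =>
    intro l acc hl
    have : l = [] := by cases l <;> simp_all
    subst this
    rw [PySem.Chars.replace.go.eq_def]
    simp [repl_nil]
  | succ n ih =>
    intro l acc hl
    cases l with
    | nil =>
      rw [PySem.Chars.replace.go.eq_def]
      simp [repl_nil]
    | cons c t =>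
      rw [PySem.Chars.replace.go.eq_def]
      by_cases h : old.isPrefixOf (c :: t) = true
      · simp only [h, if_pos]
        have hlen : old.length ≥ 1 := by cases old <;> simp_all
        have hdrop : List.drop old.length (c :: t) = List.drop (old.length - 1) t := by
          obtain ⟨k, hk⟩ : ∃ k, old.length = k + 1 := ⟨old.length - 1, by omega⟩
          simp [hk]
        have hle : (List.drop old.length (c :: t)).length ≤ n := by
          simp at hl ⊢; omega
        rw [ih _ _ hle, repl_cons_pos old new c t h, hdrop]
        simp
      · have h' : old.isPrefixOf (c :: t) = false := by
          rw [Bool.eq_false_iff]; exact h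
        simp only [h', Bool.false_eq_true, if_false]
        have hle : t.length ≤ n := by simp at hl; omega
        rw [ih _ _ hle, repl_cons_neg old new c t h']
        simp

theorem replace_eq_repl (s old new : List Char) (hold : old ≠ []) :
    PySem.Chars.replace s old new = repl old new s := by
  unfold PySem.Chars.replace
  have h : old.isEmpty = false := by cases old <;> simp_all
  rw [h]
  simpa using goSpec old new hold s.length s [] le_rfl

-- shape facts about the table, all by computation (stated on Bool, then lifted)
theorem tblB_len : (convTable.all (fun pv => pv.1.length == 6)) = true := by decide
theorem tblB_head : (convTable.all (fun pv => pv.1.head? == some '\\')) = true := by decide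
theorem tblB_tail : (convTable.all (fun pv => pv.1.tail.all (fun c => c != '\\'))) = true := by decide
theorem tblB_val_big : (convTable.all (fun pv => decide (127 < pv.2.toNat))) = true := by decide
theorem tblB_pat_ascii : (convTable.all (fun pv => pv.1.all (fun c => decide (c.toNat < 128)))) = true := by decide
theorem tblB_fun : (convTable.all (fun pv => convTable.all (fun qw => !(qw.1 == pv.1) || (qw.2 == pv.2)))) = true := by decide

theorem tbl_len : ∀ pv ∈ convTable, pv.1.length = 6 := by
  intro pv hp; simpa using List.all_eq_true.mp tblB_len pv hp
theorem tbl_head : ∀ pv ∈ convTable, pv.1.head? = some '\\' := by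
  intro pv hp; simpa using List.all_eq_true.mp tblB_head pv hp
theorem tbl_tail : ∀ pv ∈ convTable, ∀ c ∈ pv.1.tail, c ≠ '\\' := by
  intro pv hp c hc
  simpa using List.all_eq_true.mp (List.all_eq_true.mp tblB_tail pv hp) c hc
theorem tbl_val_big : ∀ pv ∈ convTable, 127 < pv.2.toNat := by
  intro pv hp; simpa using List.all_eq_true.mp tblB_val_big pv hp
theorem tbl_pat_ascii : ∀ pv ∈ convTable, ∀ c ∈ pv.1, c.toNat < 128 := by
  intro pv hp c hc
  simpa using List.all_eq_true.mp (List.all_eq_true.mp tblB_pat_ascii pv hp) c hc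
theorem tbl_fun : ∀ pv ∈ convTable, ∀ qw ∈ convTable, qw.1 = pv.1 → qw.2 = pv.2 := by
  intro pv hp qw hq heq
  have := List.all_eq_true.mp (List.all_eq_true.mp tblB_fun pv hp) qw hq
  simp [heq] at this
  exact this

theorem tbl_val_notin (pv qw : List Char × Char) (hp : pv ∈ convTable) (hq : qw ∈ convTable) :
    qw.2 ∉ pv.1 := by
  intro hmem
  have h1 := tbl_pat_ascii pv hp qw.2 hmem
  have h2 := tbl_val_big qw hq
  omega

-- a prefix avoiding the replacement character w survives repl backwards
theorem front (q : List Char) (w : Char) :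
    ∀ (n : Nat) (s r : List Char), s.length ≤ n → w ∉ r →
      r <+: repl q [w] s → r <+: s := by
  intro n
  induction n with
  | zero =>
    intro s r hs hw hpre
    have : s = [] := by cases s <;> simp_all
    subst this; simpa [repl_nil] using hpre
  | succ n ih =>
    intro s r hs hw hpre
    cases s with
    | nil => simpa [repl_nil] using hpre
    | cons c t =>
      by_cases h : q.isPrefixOf (c :: t) = true
      · rw [repl_cons_pos q [w] c t h] at hpre
        cases r with
        | nil => exact List.nil_prefix
        | cons a r' =>
          exfalso
          have ha : a = w := by
            have := (List.cons_prefix_cons.mp (by simpa using hpre)).1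
            simpa using this
          exact hw (by simp [ha])
      · have h' : q.isPrefixOf (c :: t) = false := by rw [Bool.eq_false_iff]; exact h
        rw [repl_cons_neg q [w] c t h'] at hpre
        cases r with
        | nil => exact List.nil_prefix
        | cons a r' =>
          obtain ⟨hac, hr'⟩ := List.cons_prefix_cons.mp hpre
          have hw' : w ∉ r' := fun hm => hw (by simp [hm])
          have ht : t.length ≤ n := by simp at hs; omega
          exact List.cons_prefix_cons.mpr ⟨hac, ih t r' ht hw' hr'⟩

def replFold (L : List (List Char × Char)) (s : List Char) : List Char :=
  List.foldl (fun ns pv => repl pv.1 [pv.2] ns) s L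

theorem replFold_cons (qw : List Char × Char) (L : List (List Char × Char)) (s : List Char) :
    replFold (qw :: L) s = replFold L (repl qw.1 [qw.2] s) := rfl

theorem replFold_nil_str : ∀ L, replFold L [] = [] := by
  intro L
  induction L with
  | nil => rfl
  | cons pv L ih => rw [replFold_cons, repl_nil]; exact ih

-- a non-ASCII head passes through the whole chain untouched
theorem vhead (v : Char) (hv : 127 < v.toNat) :
    ∀ L, (∀ pv ∈ L, pv ∈ convTable) → ∀ u, replFold L (v :: u) = v :: replFold L u := by
  intro L
  induction L with
  | nil => intro _ u; rfl
  | cons qw L ih =>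
    intro hL u
    have hq := tbl_head qw (hL qw (by simp))
    have hpre : qw.1.isPrefixOf (v :: u) = false := by
      cases hqw : qw.1 with
      | nil => rw [hqw] at hq; simp at hq
      | cons a q' =>
        rw [hqw] at hq
        have ha : a = '\\' := by simpa using hq
        subst ha
        apply notPrefix_of_head_ne
        intro hcontra
        rw [← hcontra] at hv
        simp at hv
    rw [replFold_cons, repl_cons_neg _ _ _ _ hpre]
    rw [ih (fun pv h => hL pv (by simp [h])) (repl qw.1 [qw.2] u)]
    rw [replFold_cons]

theorem list_len6 (l : List Char) (h : l.length = 6) :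
    ∃ a b c d e f, l = [a, b, c, d, e, f] := by
  rcases l with _ | ⟨a, l⟩; · simp at h
  rcases l with _ | ⟨b, l⟩; · simp at h
  rcases l with _ | ⟨c, l⟩; · simp at h
  rcases l with _ | ⟨d, l⟩; · simp at h
  rcases l with _ | ⟨e, l⟩; · simp at h
  rcases l with _ | ⟨f, l⟩; · simp at h
  rcases l with _ | ⟨g, l⟩
  · exact ⟨a, b, c, d, e, f, rfl⟩
  · simp at h

-- a different table pattern walks over a whole matched block without firing
theorem skipblock (qw pv : List Char × Char) (hq : qw ∈ convTable) (hp : pv ∈ convTable)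
    (hne : qw.1 ≠ pv.1) (t : List Char) :
    repl qw.1 [qw.2] (pv.1 ++ t) = pv.1 ++ repl qw.1 [qw.2] t := by
  obtain ⟨c0, c1, c2, c3, c4, c5, hpv⟩ := list_len6 pv.1 (tbl_len pv hp)
  have hh := tbl_head pv hp
  rw [hpv] at hh
  have hc0 : c0 = '\\' := by simpa using hh
  have htl := tbl_tail pv hp
  rw [hpv] at htl
  have hc1 : c1 ≠ '\\' := htl c1 (by simp)
  have hc2 : c2 ≠ '\\' := htl c2 (by simp)
  have hc3 : c3 ≠ '\\' := htl c3 (by simp)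
  have hc4 : c4 ≠ '\\' := htl c4 (by simp)
  have hc5 : c5 ≠ '\\' := htl c5 (by simp)
  obtain ⟨q0, q', hqw⟩ : ∃ q0 q', qw.1 = q0 :: q' := by
    have := tbl_head qw hq
    cases hq1 : qw.1 with
    | nil => rw [hq1] at this; simp at this
    | cons a q' => exact ⟨a, q', rfl⟩
  have hq0 : q0 = '\\' := by
    have := tbl_head qw hq
    rw [hqw] at this; simpa using this
  have h0 : qw.1.isPrefixOf (c0 :: c1 :: c2 :: c3 :: c4 :: c5 :: t) = false := by
    rw [isPrefixOf_false_iff]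
    intro hpre
    have heq : qw.1 = List.take qw.1.length ((c0 :: c1 :: c2 :: c3 :: c4 :: c5 :: []) ++ t) := by
      simpa using List.prefix_iff_eq_take.mp hpre
    rw [tbl_len qw hq] at heq
    rw [show (6 : Nat) = ([c0, c1, c2, c3, c4, c5] : List Char).length from rfl,
        List.take_left] at heq
    exact hne (by rw [heq, hpv])
  have h1 : qw.1.isPrefixOf (c1 :: c2 :: c3 :: c4 :: c5 :: t) = false := by
    rw [hqw, hq0]; exact notPrefix_of_head_ne _ _ _ _ (fun h => hc1 h.symm)
  have h2 : qw.1.isPrefixOf (c2 :: c3 :: c4 :: c5 :: t) = false := by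
    rw [hqw, hq0]; exact notPrefix_of_head_ne _ _ _ _ (fun h => hc2 h.symm)
  have h3 : qw.1.isPrefixOf (c3 :: c4 :: c5 :: t) = false := by
    rw [hqw, hq0]; exact notPrefix_of_head_ne _ _ _ _ (fun h => hc3 h.symm)
  have h4 : qw.1.isPrefixOf (c4 :: c5 :: t) = false := by
    rw [hqw, hq0]; exact notPrefix_of_head_ne _ _ _ _ (fun h => hc4 h.symm)
  have h5 : qw.1.isPrefixOf (c5 :: t) = false := by
    rw [hqw, hq0]; exact notPrefix_of_head_ne _ _ _ _ (fun h => hc5 h.symm)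
  rw [hpv]
  simp only [List.cons_append, List.nil_append]
  rw [repl_cons_neg _ _ _ _ h0, repl_cons_neg _ _ _ _ h1, repl_cons_neg _ _ _ _ h2,
      repl_cons_neg _ _ _ _ h3, repl_cons_neg _ _ _ _ h4, repl_cons_neg _ _ _ _ h5]

-- the chain on a string beginning with a table token: the token's character comes out in front
theorem matchfold (pv : List Char × Char) (hpv : pv ∈ convTable) :
    ∀ L, (∀ qw ∈ L, qw ∈ convTable) → pv ∈ L →
      ∀ t, replFold L (pv.1 ++ t) = pv.2 :: replFold L t := by
  intro L
  induction L with
  | nil => intro _ hmem; simp at hmem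
  | cons qw L ih =>
    intro hL hmem t
    have hLsub : ∀ x ∈ L, x ∈ convTable := fun x h => hL x (by simp [h])
    by_cases hqp : qw.1 = pv.1
    · have hw : qw.2 = pv.2 := tbl_fun pv hpv qw (hL qw (by simp)) hqp
      obtain ⟨pc, pr, hp1⟩ : ∃ pc pr, pv.1 = pc :: pr := by
        obtain ⟨a, b, c, d, e, f, h6⟩ := list_len6 pv.1 (tbl_len pv hpv)
        exact ⟨a, _, h6⟩
      have hprefix : qw.1.isPrefixOf (pv.1 ++ t) = true := by
        rw [hqp]; exact List.isPrefixOf_iff_prefix.mpr (List.prefix_append _ _)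
      have hprlen : pr.length = 5 := by
        have := tbl_len pv hpv; rw [hp1] at this; simpa using this
      have hstep : repl qw.1 [qw.2] (pv.1 ++ t) = qw.2 :: repl qw.1 [qw.2] t := by
        rw [hp1]
        simp only [List.cons_append]
        rw [repl_cons_pos _ _ _ _ (by rw [hp1] at hprefix; simpa using hprefix)]
        rw [hqp, hp1]
        have hlen : ((pc :: pr).length - 1) = pr.length := by simp
        rw [hlen, List.drop_left]
        simp
      rw [replFold_cons, hstep,
          vhead qw.2 (tbl_val_big qw (hL qw (by simp))) L hLsub,
          replFold_cons, hw]
    · have hmem' : pv ∈ L := by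
        rcases List.mem_cons.mp hmem with h | h
        · exact absurd (by rw [h]) hqp
        · exact h
      rw [replFold_cons, skipblock qw pv (hL qw (by simp)) hpv hqp,
          ih hLsub hmem' (repl qw.1 [qw.2] t), replFold_cons]

-- no table token starts here: the head character passes through the whole chain
theorem nomatchfold (c : Char) (t : List Char) :
    ∀ L, (∀ pv ∈ L, pv ∈ convTable) → (∀ pv ∈ L, ¬ pv.1 <+: (c :: t)) →
      replFold L (c :: t) = c :: replFold L t := by
  intro L
  induction L generalizing t with
  | nil => intro _ _; rfl
  | cons qw L ih =>
    intro hL hnp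
    have hLsub : ∀ x ∈ L, x ∈ convTable := fun x h => hL x (by simp [h])
    have hpre : qw.1.isPrefixOf (c :: t) = false :=
      (isPrefixOf_false_iff _ _).mpr (hnp qw (by simp))
    rw [replFold_cons, repl_cons_neg _ _ _ _ hpre]
    rw [ih _ hLsub ?hnp', replFold_cons]
    case hnp' =>
      intro pv hm hcontra
      cases hp1 : pv.1 with
      | nil => exact hnp pv (by simp [hm]) (by rw [hp1]; exact List.nil_prefix)
      | cons a r' =>
        rw [hp1] at hcontra
        obtain ⟨hac, hr'⟩ := List.cons_prefix_cons.mp hcontra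
        have hw : qw.2 ∉ r' := by
          intro hmm
          exact tbl_val_notin pv qw (hLsub pv hm) (hL qw (by simp))
            (by rw [hp1]; simp [hmm])
        have := front qw.1 qw.2 t.length t r' le_rfl hw hr'
        exact hnp pv (by simp [hm]) (by rw [hp1]; exact List.cons_prefix_cons.mpr ⟨hac, this⟩)

-- MAIN: the full replace chain equals the single scan
theorem mainScan : ∀ (n : Nat) (s : List Char), s.length ≤ n →
    replFold convTable s = scanConvert s := by
  intro n
  induction n with
  | zero =>
    intro s hs
    have : s = [] := by cases s <;> simp_all
    subst this
    rw [replFold_nil_str, scanConvert]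
  | succ n ih =>
    intro s hs
    cases s with
    | nil => rw [replFold_nil_str, scanConvert]
    | cons c t =>
      cases hlk : lookupToken (List.take 6 (c :: t)) with
      | some v =>
        obtain ⟨pv, hfind, hv2⟩ := Option.map_eq_some_iff.mp hlk
        have hmem : pv ∈ convTable := List.mem_of_find?_eq_some hfind
        have hkey : pv.1 = List.take 6 (c :: t) := by
          have := List.find?_some hfind; simpa using this
        have hlen6 : pv.1.length = 6 := tbl_len pv hmem
        have hslen : 6 ≤ (c :: t).length := by
          have h1 : (List.take 6 (c :: t)).length = 6 := by rw [← hkey, hlen6]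
          rw [List.length_take] at h1; omega
        have hsplit : (c :: t) = pv.1 ++ List.drop 6 (c :: t) := by
          rw [hkey]; exact (List.take_append_drop 6 (c :: t)).symm
        have hdlen : (List.drop 6 (c :: t)).length ≤ n := by
          simp only [List.length_drop, List.length_cons]
          simp at hs; omega
        have hdrop : List.drop 6 (c :: t) = List.drop 5 t := by
          simp [List.drop_succ_cons]
        calc replFold convTable (c :: t)
            = replFold convTable (pv.1 ++ List.drop 6 (c :: t)) := by rw [← hsplit]
          _ = pv.2 :: replFold convTable (List.drop 6 (c :: t)) :=
              matchfold pv hmem convTable (fun _ h => h) hmem _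
          _ = v :: scanConvert (List.drop 5 t) := by
              rw [hv2, ih _ hdlen, hdrop]
          _ = scanConvert (c :: t) := by
              rw [scanConvert, hlk]
      | none =>
        have hnp : ∀ pv ∈ convTable, ¬ pv.1 <+: (c :: t) := by
          intro pv hm hpre
          have hkey : pv.1 = List.take 6 (c :: t) := by
            have h6 := tbl_len pv hm
            have := List.prefix_iff_eq_take.mp hpre
            rw [h6] at this; exact this
          have hnone : convTable.find? (fun pv => pv.1 == List.take 6 (c :: t)) = none := by
            unfold lookupToken at hlk
            exact Option.map_eq_none_iff.mp hlk
          have := List.find?_eq_none.mp hnone pv hm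
          simp [hkey] at this
        rw [nomatchfold c t convTable (fun _ h => h) hnp, ih t (by simp at hs; omega)]
        rw [scanConvert, hlk]

-- bridge: port A's string-level fold, pushed down to char lists
theorem fold_toList : ∀ (L : List (String × String)) (s : String),
    (List.foldl (fun ns cv => PySem.Str.replace ns cv.1 cv.2) s L).toList
      = List.foldl (fun ns cv => PySem.Chars.replace ns cv.1.toList cv.2.toList) s.toList L := by
  intro L
  induction L with
  | nil => intro s; rfl
  | cons cv L ih =>
    intro s
    simp only [List.foldl_cons]
    rw [ih, PySem.Str.toList_replace]

theorem charConv_corr :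
    charConversion.map (fun cv => (cv.1.toList, cv.2.toList))
      = convTable.map (fun pv => (pv.1, [pv.2])) := by decide

theorem foldrep : ∀ L, (∀ pv ∈ L, pv ∈ convTable) → ∀ s,
    List.foldl (fun ns pv => PySem.Chars.replace ns pv.1 [pv.2]) s L = replFold L s := by
  intro L
  induction L with
  | nil => intro _ s; rfl
  | cons qw L ih =>
    intro hL s
    have hne : qw.1 ≠ [] := by
      have := tbl_len qw (hL qw (by simp))
      intro h; rw [h] at this; simp at this
    simp only [List.foldl_cons]
    rw [replace_eq_repl s qw.1 [qw.2] hne, ih (fun x h => hL x (by simp [h])), replFold_cons]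

theorem A_toList (s : String) :
    (convertEncodedCharacters s).toList = replFold convTable s.toList := by
  unfold convertEncodedCharacters
  rw [fold_toList]
  rw [← List.foldl_map (f := fun cv : String × String => (cv.1.toList, cv.2.toList))
        (g := fun (ns : List Char) (pv : List Char × List Char) => PySem.Chars.replace ns pv.1 pv.2)]
  rw [charConv_corr]
  rw [List.foldl_map]
  exact foldrep convTable (fun _ h => h) s.toList

-- ===== VERDICT (by name: the statement is the Claim_ definition above) =====
theorem convertEncodedCharacters_spec : Claim_equal_convertEncodedCharacters := by
  intro s _
  unfold Spec_convertEncodedCharacters convertEncodedCharacters_alt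
  have h1 : convertEncodedCharacters s = String.ofList ((convertEncodedCharacters s).toList) :=
    String.ofList_toList.symm
  rw [h1, A_toList, mainScan s.toList.length s.toList le_rfl]
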